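-- pv_equiv track=rewrite | github.com/leoisno1/docx_pptx_to_md | docx_converter.py | process_json_content
-- ===== SOURCE A (Python) =====
-- def process_json_content(text):
--     """处理JSON内容，将{和}移到最左边"""
--     lines = text.split('\n')
--     processed_lines = []
--     for line in lines:
--         stripped = line.strip()
--         if stripped.startswith('{') or stripped.startswith('}') or stripped.startswith('[') or stripped.startswith(']'):
--             processed_lines.append(stripped)
--         else:
--             processed_lines.append(line)
--     return '\n'.join(processed_lines)
-- ===== SOURCE B (Python) =====
-- _WS = ' \t\r\x0b\x0c'
-- _BR = '{}[]'
--
--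
-- def _fix(line):
--     """Trim a single line if its first non-blank char is a JSON bracket."""
--     i, n = 0, len(line)
--     while i < n and line[i] in _WS:
--         i += 1
--     if i < n and line[i] in _BR:
--         j = n
--         while line[j - 1] in _WS:
--             j -= 1
--         return line[i:j]
--     return line
--
--
-- def process_json_content(text):
--     head, sep, rest = text.partition('\n')
--     out = _fix(head)
--     while sep:
--         head, sep, rest = rest.partition('\n')
--         out += '\n' + _fix(head)
--     return out
-- ===== Notes on version B (the rewrite author's own statement) =====
-- stated objective: alternative
-- what changed: Replaces split-into-list / per-line strip+startswith / join with a single streaming pass that peels lines off with str.partition and trims bracket lines in place by two index pointers, accumulating the output string directly.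
import Mathlib
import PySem

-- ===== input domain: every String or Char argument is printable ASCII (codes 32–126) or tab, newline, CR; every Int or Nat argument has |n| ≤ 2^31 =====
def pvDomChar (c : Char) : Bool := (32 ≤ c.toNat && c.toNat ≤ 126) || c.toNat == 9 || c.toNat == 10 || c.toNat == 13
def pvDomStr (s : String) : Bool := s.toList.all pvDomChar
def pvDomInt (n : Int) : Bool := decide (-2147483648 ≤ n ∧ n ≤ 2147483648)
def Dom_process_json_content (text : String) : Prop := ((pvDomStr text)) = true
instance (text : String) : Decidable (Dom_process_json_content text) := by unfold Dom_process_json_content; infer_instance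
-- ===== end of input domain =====

-- B restructures A: instead of split('\n') / strip / startswith / join, it peels lines off with
-- str.partition('\n') in one streaming pass and trims bracket lines by two index pointers
-- (alternative decomposition, same cost); return-value equivalence (neither mutates its argument).

-- ===== PORT A =====
def process_json_content (text : String) : String :=
  let lines := PySem.Chars.splitOn text.toList ['\n']
  let processed := lines.foldl (fun acc line =>
    let stripped := PySem.Chars.strip line
    if PySem.Chars.startswith stripped ['{'] || PySem.Chars.startswith stripped ['}'] ||
       PySem.Chars.startswith stripped ['['] || PySem.Chars.startswith stripped [']'] then
      acc ++ [stripped]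
    else acc ++ [line]) []
  String.ofList (PySem.Chars.join ['\n'] processed)

-- ===== PORT B =====
-- membership test `c in ' \t\r\x0b\x0c'` of Source B
def pvWS (c : Char) : Bool :=
  c.toNat == 32 || c.toNat == 9 || c.toNat == 13 || c.toNat == 11 || c.toNat == 12

-- membership test `c in '{}[]'` of Source B
def pvBracket (c : Char) : Bool := c == '{' || c == '}' || c == '[' || c == ']'

-- the left pointer loop `while i < n and line[i] in _WS: i += 1` (returns line[i:])
def pvTrimL : List Char → List Char
  | [] => []
  | c :: rest => if pvWS c then pvTrimL rest else c :: rest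

-- _fix of Source B; the right pointer loop `while line[j-1] in _WS: j -= 1` is the same scan over the
-- reversed suffix (it stops at the bracket head at the latest, exactly as in Source B)
def pvFix (line : List Char) : List Char :=
  match pvTrimL line with
  | [] => line
  | c :: rest => if pvBracket c then (pvTrimL ((c :: rest).reverse)).reverse else line

-- the `while sep:` accumulation loop of Source B; `head, sep, rest = rest.partition('\n')` is
-- (takeWhile (· ≠ '\n'), '\n' ∈ rest, drop (head.length + 1)) — exact for the 1-char separator
def pvGo (out : List Char) (rest : List Char) : List Char :=
  let head := rest.takeWhile (· ≠ '\n')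
  let out' := out ++ '\n' :: pvFix head
  if h : '\n' ∈ rest then
    have hlt : (rest.drop (head.length + 1)).length < rest.length := by
      have hne : rest ≠ [] := by rintro rfl; simp at h
      have := List.length_pos_iff.mpr hne
      simp only [List.length_drop]; omega
    pvGo out' (rest.drop (head.length + 1))
  else out'
termination_by rest.length

def process_json_content_alt (text : String) : String :=
  let head := text.toList.takeWhile (· ≠ '\n')
  let out := pvFix head
  if '\n' ∈ text.toList then
    String.ofList (pvGo out (text.toList.drop (head.length + 1)))
  else String.ofList out

-- ===== PRECONDITION & SPEC =====
def Spec_process_json_content (text : String) (out : String) : Prop := out = process_json_content_alt text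
instance (text : String) (out : String) : Decidable (Spec_process_json_content text out) := by unfold Spec_process_json_content; infer_instance

-- ===== CLAIM (what is proved, stated in full; the proofs are below) =====
def Claim_equal_process_json_content : Prop := ∀ (text : String), Dom_process_json_content text → Spec_process_json_content text (process_json_content text)

-- ===== LEMMAS AND PROOFS =====

-- simple reference splitter: split on '\n'
def mySplit : List Char → List (List Char)
  | [] => [[]]
  | c :: rest => if c = '\n' then [] :: mySplit rest else List.modifyHead (c :: ·) (mySplit rest)

theorem mySplit_cons (c : Char) (rest : List Char) :
    mySplit (c :: rest)
      = if c = '\n' then [] :: mySplit rest else List.modifyHead (c :: ·) (mySplit rest) := rfl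

theorem mySplit_ne_nil (cs : List Char) : mySplit cs ≠ [] := by
  induction cs with
  | nil => simp [mySplit]
  | cons c rest ih =>
    rw [mySplit_cons]
    split_ifs
    · simp
    · cases h : mySplit rest with
      | nil => exact absurd h ih
      | cons t ts => simp [List.modifyHead]

theorem go_spec (l : List Char) : ∀ fuel cur acc, l.length < fuel →
    PySem.Chars.splitOn.go ['\n'] fuel l cur acc
      = acc.reverse ++ List.modifyHead (cur.reverse ++ ·) (mySplit l) := by
  induction l with
  | nil =>
    intro fuel cur acc h
    match fuel with
    | fuel + 1 => simp [PySem.Chars.splitOn.go, mySplit]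
  | cons c rest ih =>
    intro fuel cur acc h
    match fuel with
    | fuel + 1 =>
      by_cases hc : c = '\n'
      · subst hc
        have hpre : List.isPrefixOf ['\n'] ('\n' :: rest) = true := by simp [List.isPrefixOf]
        rw [PySem.Chars.splitOn.go, if_pos hpre,
          show List.drop ['\n'].length ('\n' :: rest) = rest from rfl]
        simp only [List.length_cons] at h
        rw [ih fuel [] (cur.reverse :: acc) (by omega)]
        rw [mySplit_cons, if_pos rfl]
        cases hms : mySplit rest with
        | nil => exact absurd hms (mySplit_ne_nil rest)
        | cons t ts => simp [List.modifyHead]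
      · have hpre : List.isPrefixOf ['\n'] (c :: rest) = false := by
          simp only [List.isPrefixOf, Bool.and_true, beq_eq_false_iff_ne, ne_eq]
          exact fun h' => hc h'.symm
        rw [PySem.Chars.splitOn.go, if_neg (by simp [hpre])]
        simp only [List.length_cons] at h
        rw [ih fuel (c :: cur) acc (by omega)]
        rw [mySplit_cons, if_neg hc]
        cases hms : mySplit rest with
        | nil => exact absurd hms (mySplit_ne_nil rest)
        | cons t ts => simp [List.modifyHead]

theorem splitOn_eq_mySplit (cs : List Char) :
    PySem.Chars.splitOn cs ['\n'] = mySplit cs := by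
  rw [PySem.Chars.splitOn, go_spec cs (cs.length + 1) [] [] (by omega)]
  cases hms : mySplit cs with
  | nil => exact absurd hms (mySplit_ne_nil cs)
  | cons t ts => simp [List.modifyHead]

-- the per-line transform A applies
def fA (line : List Char) : List Char :=
  let stripped := PySem.Chars.strip line
  if PySem.Chars.startswith stripped ['{'] || PySem.Chars.startswith stripped ['}'] ||
     PySem.Chars.startswith stripped ['['] || PySem.Chars.startswith stripped [']'] then
    stripped
  else line

theorem pvTrimL_eq_dropWhile (cs : List Char) : pvTrimL cs = cs.dropWhile pvWS := by
  induction cs with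
  | nil => rfl
  | cons c rest ih => simp only [pvTrimL, List.dropWhile_cons]; split_ifs <;> simp [ih]

theorem dropWhile_congr_mem {p q : Char → Bool} (cs : List Char)
    (h : ∀ c ∈ cs, p c = q c) : cs.dropWhile p = cs.dropWhile q := by
  induction cs with
  | nil => rfl
  | cons c rest ih =>
    have hc := h c (by simp)
    simp only [List.dropWhile_cons, hc]
    split_ifs
    · exact ih fun x hx => h x (by simp [hx])
    · rfl

theorem rstrip_like_cons {p : Char → Bool} (c : Char) (rest : List Char) (hc : p c = false) :
    (List.dropWhile p ((c :: rest).reverse)).reverse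
      = c :: (List.dropWhile p rest.reverse).reverse := by
  simp only [List.reverse_cons, List.dropWhile_append]
  split_ifs with h
  · have : List.dropWhile p rest.reverse = [] := by
      simpa [List.isEmpty_iff] using h
    simp [this, hc]
  · simp

theorem isspace_eq_pvWS (c : Char) (hdom : pvDomChar c = true) (hnl : c ≠ '\n') :
    PySem.Chars.isspace c = pvWS c := by
  have hn : c.toNat ≠ 10 := by
    intro h10; apply hnl; apply Char.ext
    apply UInt32.toNat_inj.mp
    rw [show ('\n').val.toNat = 10 from rfl]
    exact h10
  simp only [pvDomChar, Bool.or_eq_true, Bool.and_eq_true, decide_eq_true_eq, beq_iff_eq] at hdom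
  rw [Bool.eq_iff_iff]
  simp only [PySem.Chars.isspace, pvWS, Bool.or_eq_true, Bool.and_eq_true, decide_eq_true_eq,
    beq_iff_eq]
  omega

theorem startswith_cons (b c : Char) (R : List Char) :
    PySem.Chars.startswith (c :: R) [b] = (b == c) := by
  show (b == c && List.isPrefixOf [] R) = (b == c)
  simp

theorem fix_eq_fA (line : List Char)
    (h : ∀ c ∈ line, pvDomChar c = true ∧ c ≠ '\n') : pvFix line = fA line := by
  have hws : ∀ c ∈ line, PySem.Chars.isspace c = pvWS c := fun c hc =>
    isspace_eq_pvWS c (h c hc).1 (h c hc).2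
  have hls : PySem.Chars.lstrip line = pvTrimL line := by
    rw [PySem.Chars.lstrip, pvTrimL_eq_dropWhile, dropWhile_congr_mem line hws]
  cases ht : pvTrimL line with
  | nil =>
    have hB : pvFix line = line := by unfold pvFix; rw [ht]
    have h2 : PySem.Chars.strip line = [] := by rw [PySem.Chars.strip, hls, ht]; rfl
    rw [hB]
    simp only [fA, h2]
    rw [if_neg (by decide)]
  | cons c rest =>
    have hdw : line.dropWhile pvWS = c :: rest := by rw [← pvTrimL_eq_dropWhile, ht]
    have hmem : ∀ x ∈ c :: rest, x ∈ line := by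
      intro x hx
      exact List.Sublist.mem (hdw ▸ hx) (List.dropWhile_sublist pvWS)
    have hcws : pvWS c = false := by
      have hne : line.dropWhile pvWS ≠ [] := by simp [hdw]
      have := List.head_dropWhile_not pvWS hne
      simpa [hdw] using this
    have hcss : PySem.Chars.isspace c = false := by
      rw [hws c (hmem c (by simp))]; exact hcws
    have hstrip : PySem.Chars.strip line
        = c :: (List.dropWhile PySem.Chars.isspace rest.reverse).reverse := by
      rw [PySem.Chars.strip, hls, ht, PySem.Chars.rstrip, rstrip_like_cons c rest hcss]
    have hrev_congr : (List.dropWhile PySem.Chars.isspace rest.reverse).reverse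
        = (List.dropWhile pvWS rest.reverse).reverse := by
      rw [dropWhile_congr_mem rest.reverse
        (fun x hx => hws x (hmem x (by simp [List.mem_reverse.mp hx])))]
    by_cases hb : pvBracket c = true
    · have hcond : (PySem.Chars.startswith (PySem.Chars.strip line) ['{'] ||
          PySem.Chars.startswith (PySem.Chars.strip line) ['}'] ||
          PySem.Chars.startswith (PySem.Chars.strip line) ['['] ||
          PySem.Chars.startswith (PySem.Chars.strip line) [']']) = true := by
        rw [hstrip, startswith_cons, startswith_cons, startswith_cons, startswith_cons]
        simp only [pvBracket, Bool.or_eq_true, beq_iff_eq] at hb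
        rcases hb with ((rfl | rfl) | rfl) | rfl <;> decide
      have hB : pvFix line = (pvTrimL ((c :: rest).reverse)).reverse := by
        unfold pvFix; rw [ht]; exact if_pos hb
      have hA : fA line = PySem.Chars.strip line := by
        simp only [fA]; rw [hcond]; rw [if_pos rfl]
      rw [hA, hB, hstrip, pvTrimL_eq_dropWhile, rstrip_like_cons c rest hcws, hrev_congr]
    · have hcond : (PySem.Chars.startswith (PySem.Chars.strip line) ['{'] ||
          PySem.Chars.startswith (PySem.Chars.strip line) ['}'] ||
          PySem.Chars.startswith (PySem.Chars.strip line) ['['] ||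
          PySem.Chars.startswith (PySem.Chars.strip line) [']']) = false := by
        rw [hstrip, startswith_cons, startswith_cons, startswith_cons, startswith_cons]
        simp only [pvBracket, Bool.or_eq_true, beq_iff_eq] at hb
        push Not at hb
        simp only [Bool.or_eq_false_iff, beq_eq_false_iff_ne, ne_eq]
        exact ⟨⟨⟨fun hh => hb.1.1.1 hh.symm, fun hh => hb.1.1.2 hh.symm⟩,
          fun hh => hb.1.2 hh.symm⟩, fun hh => hb.2 hh.symm⟩
      have hB : pvFix line = line := by unfold pvFix; rw [ht]; exact if_neg hb
      have hA : fA line = line := by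
        simp only [fA]; rw [hcond]; rw [if_neg (by simp)]
      rw [hA, hB]

theorem mySplit_mem (cs : List Char) :
    ∀ l ∈ mySplit cs, ∀ c ∈ l, c ∈ cs ∧ c ≠ '\n' := by
  induction cs with
  | nil => intro l hl c hc; simp [mySplit] at hl; subst hl; simp at hc
  | cons c0 rest ih =>
    intro l hl c hc
    by_cases h0 : c0 = '\n'
    · subst h0
      rw [mySplit_cons, if_pos rfl] at hl
      rcases List.mem_cons.mp hl with rfl | hl
      · simp at hc
      · have := ih l hl c hc
        exact ⟨by simp [this.1], this.2⟩
    · rw [mySplit_cons, if_neg h0] at hl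
      cases hms : mySplit rest with
      | nil => exact absurd hms (mySplit_ne_nil rest)
      | cons t ts =>
        rw [hms] at hl
        simp only [List.modifyHead, List.mem_cons] at hl
        rcases hl with rfl | hl
        · rcases List.mem_cons.mp hc with rfl | hc'
          · exact ⟨by simp, h0⟩
          · have := ih t (by rw [hms]; simp) c hc'
            exact ⟨by simp [this.1], this.2⟩
        · have := ih l (by rw [hms]; simp [hl]) c hc
          exact ⟨by simp [this.1], this.2⟩

theorem mySplit_split (cs : List Char) (h : '\n' ∈ cs) :
    mySplit cs = cs.takeWhile (· ≠ '\n')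
      :: mySplit (cs.drop ((cs.takeWhile (· ≠ '\n')).length + 1)) := by
  induction cs with
  | nil => simp at h
  | cons c rest ih =>
    by_cases hc : c = '\n'
    · subst hc; simp [mySplit_cons]
    · have hr : '\n' ∈ rest := by
        rcases List.mem_cons.mp h with h' | h'
        · exact absurd h'.symm hc
        · exact h'
      rw [mySplit_cons, if_neg hc, ih hr]
      simp [hc, List.modifyHead]

theorem mySplit_no_nl (cs : List Char) (h : '\n' ∉ cs) : mySplit cs = [cs] := by
  induction cs with
  | nil => rfl
  | cons c rest ih =>
    have hc : c ≠ '\n' := fun hh => h (by simp [hh])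
    rw [mySplit_cons, if_neg hc, ih (fun hh => h (by simp [hh]))]
    simp [List.modifyHead]

theorem takeWhile_eq_self_of_no_nl (cs : List Char) (h : '\n' ∉ cs) :
    cs.takeWhile (· ≠ '\n') = cs := by
  rw [List.takeWhile_eq_self_iff]
  intro a ha
  have hne : a ≠ '\n' := fun hh => h (hh ▸ ha)
  simpa using hne

theorem join_cons_cons (a b : List Char) (l : List (List Char)) :
    PySem.Chars.join ['\n'] (a :: b :: l) = a ++ '\n' :: PySem.Chars.join ['\n'] (b :: l) := by
  simp [PySem.Chars.join, List.intercalate, List.intersperse]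

theorem join_singleton' (a : List Char) : PySem.Chars.join ['\n'] [a] = a := by
  simp [PySem.Chars.join, List.intercalate]

theorem pvGo_spec (n : Nat) : ∀ rest : List Char, rest.length ≤ n → ∀ out,
    pvGo out rest = out ++ '\n' :: PySem.Chars.join ['\n'] ((mySplit rest).map pvFix) := by
  induction n with
  | zero =>
    intro rest hlen out
    have : rest = [] := List.length_eq_zero_iff.mp (Nat.le_zero.mp hlen)
    subst this
    rw [pvGo]
    simp [mySplit]
  | succ n ih =>
    intro rest hlen out
    rw [pvGo]
    by_cases h : '\n' ∈ rest
    · simp only [dif_pos h]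
      have hne : rest ≠ [] := by rintro rfl; simp at h
      have hpos := List.length_pos_iff.mpr hne
      have hlt : (rest.drop ((rest.takeWhile (· ≠ '\n')).length + 1)).length ≤ n := by
        simp only [List.length_drop]; omega
      rw [ih _ hlt]
      rw [mySplit_split rest h, List.map_cons]
      cases hms : mySplit (rest.drop ((rest.takeWhile (· ≠ '\n')).length + 1)) with
      | nil => exact absurd hms (mySplit_ne_nil _)
      | cons t ts =>
        rw [List.map_cons, join_cons_cons]
        simp
    · simp only [dif_neg h]
      rw [mySplit_no_nl rest h, List.map_cons, List.map_nil, join_singleton',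
        takeWhile_eq_self_of_no_nl rest h]

theorem foldl_body_eq (lines : List (List Char)) (acc : List (List Char)) :
    lines.foldl (fun acc line =>
      let stripped := PySem.Chars.strip line
      if PySem.Chars.startswith stripped ['{'] || PySem.Chars.startswith stripped ['}'] ||
         PySem.Chars.startswith stripped ['['] || PySem.Chars.startswith stripped [']'] then
        acc ++ [stripped]
      else acc ++ [line]) acc = acc ++ lines.map fA := by
  induction lines generalizing acc with
  | nil => simp
  | cons l rest ih =>
    simp only [List.foldl_cons, List.map_cons, ih]
    by_cases hc : (PySem.Chars.startswith (PySem.Chars.strip l) ['{'] ||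
        PySem.Chars.startswith (PySem.Chars.strip l) ['}'] ||
        PySem.Chars.startswith (PySem.Chars.strip l) ['['] ||
        PySem.Chars.startswith (PySem.Chars.strip l) [']']) = true <;>
      simp [fA, hc]

-- ===== VERDICT (by name: the statement is the Claim_ definition above) =====
theorem process_json_content_spec : Claim_equal_process_json_content := by
  intro text hdom
  unfold Spec_process_json_content
  simp only [process_json_content, process_json_content_alt]
  have hdom' : ∀ c ∈ text.toList, pvDomChar c = true := by
    have : text.toList.all pvDomChar = true := hdom
    intro c hc
    exact List.all_eq_true.mp this c hc
  rw [foldl_body_eq, List.nil_append, splitOn_eq_mySplit]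
  set cs := text.toList with hcs
  have hfix : ∀ l, (∀ c ∈ l, c ∈ cs ∧ c ≠ '\n') → fA l = pvFix l := by
    intro l hl
    exact (fix_eq_fA l (fun c hc => ⟨hdom' c (hl c hc).1, (hl c hc).2⟩)).symm
  have hmap : ∀ ds : List Char, (∀ c ∈ ds, c ∈ cs) →
      (mySplit ds).map fA = (mySplit ds).map pvFix := by
    intro ds hds
    apply List.map_congr_left
    intro l hl
    exact hfix l (fun c hc =>
      ⟨hds c (mySplit_mem ds l hl c hc).1, (mySplit_mem ds l hl c hc).2⟩)
  by_cases h : '\n' ∈ cs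
  · rw [if_pos h, pvGo_spec (cs.drop ((cs.takeWhile (· ≠ '\n')).length + 1)).length _ le_rfl]
    rw [mySplit_split cs h, List.map_cons]
    have hhead : fA (cs.takeWhile (· ≠ '\n')) = pvFix (cs.takeWhile (· ≠ '\n')) := by
      refine hfix _ (fun c hc => ?_)
      refine ⟨List.Sublist.mem hc (List.takeWhile_sublist _), ?_⟩
      have := List.mem_takeWhile_imp hc
      simpa using this
    rw [hhead, hmap _ (fun c hc => List.mem_of_mem_drop hc)]
    cases hms : mySplit (cs.drop ((cs.takeWhile (· ≠ '\n')).length + 1)) with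
    | nil => exact absurd hms (mySplit_ne_nil _)
    | cons t ts =>
      rw [List.map_cons, join_cons_cons]
  · rw [if_neg h, mySplit_no_nl cs h, List.map_cons, List.map_nil, join_singleton']
    rw [hfix cs (fun c hc => ⟨hc, fun hh => h (hh ▸ hc)⟩)]
    rw [takeWhile_eq_self_of_no_nl cs h]
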